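-- pv_equiv track=rewrite | github.com/cofiem/screenshot-ocr | screenshot_ocr/trivia.py | extract_question_number_text
-- ===== SOURCE A (Python) =====
-- def extract_question_number_text(value: str):
--     key_question = "question"
--     number = None
--     text = ""
--     for line in value.splitlines():
--         line_lower = line.casefold()
--
--         if line.strip() and number is None and key_question in line_lower:
--             number = int(line_lower.replace(key_question, "").strip())
--             continue
--
--         if not line.strip():
--             continue
--         text += " " + line.strip()
--
--     text = text.strip()
--     return number, text
-- ===== SOURCE B (Python) =====
-- def extract_question_number_text(value: str):
--     lines = value.splitlines()
--     for i, line in enumerate(lines):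
--         low = line.casefold()
--         if line.strip() and "question" in low:
--             number = int(low.replace("question", "").strip())
--             rest = lines[:i] + lines[i + 1:]
--             break
--     else:
--         number = None
--         rest = lines
--     parts = [l.strip() for l in rest if l.strip()]
--     return number, " ".join(parts)
-- ===== Notes on version B (the rewrite author's own statement) =====
-- stated objective: alternative
-- what changed: A interleaves number-detection and string accumulation in one fold that concatenates ' '+line into a growing string and strips at the end; B first scans with enumerate/break for the index of the question line, then removes it by slicing and builds the text as a single ' '.join over a filtered list.
import Mathlib
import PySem

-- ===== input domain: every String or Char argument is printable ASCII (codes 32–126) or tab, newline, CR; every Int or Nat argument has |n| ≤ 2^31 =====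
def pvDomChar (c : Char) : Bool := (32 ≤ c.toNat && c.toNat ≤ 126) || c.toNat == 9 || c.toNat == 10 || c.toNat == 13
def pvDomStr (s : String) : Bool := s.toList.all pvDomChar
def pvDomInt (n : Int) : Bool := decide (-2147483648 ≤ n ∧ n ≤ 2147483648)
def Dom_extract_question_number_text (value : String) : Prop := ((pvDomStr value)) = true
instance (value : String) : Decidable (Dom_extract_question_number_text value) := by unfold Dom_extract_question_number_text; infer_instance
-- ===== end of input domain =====

-- B replaces A's single interleaved fold (inline string accumulation) by a separate
-- scan for the first 'question' line followed by a filter + join over the remaining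
-- slices; same return value, alternative decomposition (no speed claim).

-- ===== PORT A =====
-- Pre_ excludes inputs where int(...) raises ValueError; inside Pre_ the .getD 0 default is never used.
def extract_question_number_text (value : String) : Option Int × String :=
  let res := (PySem.Str.splitlines value).foldl
    (fun (st : Option Int × String) line =>
      let line_lower := PySem.Str.lower line
      if PySem.Str.strip line ≠ "" ∧ st.1 = none ∧ PySem.Str.isIn "question" line_lower = true then
        (some ((PySem.Int.ofStr? (PySem.Str.strip (PySem.Str.replace line_lower "question" ""))).getD 0), st.2)
      else if PySem.Str.strip line = "" then st
      else (st.1, st.2 ++ " " ++ PySem.Str.strip line))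
    (none, "")
  (res.1, PySem.Str.strip res.2)

-- ===== PORT B =====
-- the for/enumerate/break search of Source B: first (index, line) with line.strip() and "question" in line.casefold()
def pvScanQ : List String → Nat → Option (Nat × String)
  | [], _ => none
  | l :: ls, i =>
    if PySem.Str.strip l ≠ "" ∧ PySem.Str.isIn "question" (PySem.Str.lower l) = true then some (i, l)
    else pvScanQ ls (i + 1)

def extract_question_number_text_alt (value : String) : Option Int × String :=
  let lines := PySem.Str.splitlines value
  let nr : Option Int × List String :=
    match pvScanQ lines 0 with
    | some (i, line) =>
        (some ((PySem.Int.ofStr? (PySem.Str.strip (PySem.Str.replace (PySem.Str.lower line) "question" ""))).getD 0),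
         PySem.List.slice lines none (some (i : Int)) ++ PySem.List.slice lines (some ((i : Int) + 1)) none)
    | none => (none, lines)
  let parts := nr.2.filterMap (fun l => if PySem.Str.strip l ≠ "" then some (PySem.Str.strip l) else none)
  (nr.1, PySem.Str.join " " parts)

-- ===== PRECONDITION & SPEC =====
-- first stripped-nonempty line whose casefold contains "question", if any
def pvQLine (lines : List String) : Option String :=
  lines.find? (fun l => decide (PySem.Str.strip l ≠ "") && PySem.Str.isIn "question" (PySem.Str.lower l))

-- Pre_ excludes exactly the inputs on which A raises ValueError: those whose first
-- nonempty line containing "question" does not parse as an int once "question" is removed.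
def Pre_extract_question_number_text (value : String) : Prop :=
  ((pvQLine (PySem.Str.splitlines value)).all
    (fun l => (PySem.Int.ofStr? (PySem.Str.strip (PySem.Str.replace (PySem.Str.lower l) "question" ""))).isSome)) = true
instance (value : String) : Decidable (Pre_extract_question_number_text value) := by
  unfold Pre_extract_question_number_text; infer_instance

def pvWitness_extract_question_number_text : String := "Question 3\nA fine cheese"

def Spec_extract_question_number_text (value : String) (out : Option Int × String) : Prop := out = extract_question_number_text_alt value
instance (value : String) (out : Option Int × String) : Decidable (Spec_extract_question_number_text value out) := by unfold Spec_extract_question_number_text; infer_instance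

-- ===== CLAIM (what is proved, stated in full; the proofs are below) =====
def Claim_equal_extract_question_number_text : Prop := ∀ (value : String), Dom_extract_question_number_text value → Pre_extract_question_number_text value → Spec_extract_question_number_text value (extract_question_number_text value)

-- ===== LEMMAS AND PROOFS =====

-- proof-side abbreviations
def pvQual (l : String) : Bool :=
  decide (PySem.Str.strip l ≠ "") && PySem.Str.isIn "question" (PySem.Str.lower l)

def pvParse (l : String) : Int :=
  (PySem.Int.ofStr? (PySem.Str.strip (PySem.Str.replace (PySem.Str.lower l) "question" ""))).getD 0

def pvStepA (st : Option Int × String) (line : String) : Option Int × String :=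
  let line_lower := PySem.Str.lower line
  if PySem.Str.strip line ≠ "" ∧ st.1 = none ∧ PySem.Str.isIn "question" line_lower = true then
    (some ((PySem.Int.ofStr? (PySem.Str.strip (PySem.Str.replace line_lower "question" ""))).getD 0), st.2)
  else if PySem.Str.strip line = "" then st
  else (st.1, st.2 ++ " " ++ PySem.Str.strip line)

def pvAcc (ls : List String) : List Char :=
  ls.flatMap (fun l => if PySem.Str.strip l = "" then [] else ' ' :: (PySem.Str.strip l).toList)

def pvPieces (ls : List String) : List String :=
  ls.filterMap (fun l => if PySem.Str.strip l ≠ "" then some (PySem.Str.strip l) else none)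

-- ---- generic dropWhile facts ----
theorem pv_dropWhile_head_false {p : Char → Bool} {l cs : List Char} {c : Char}
    (h : List.dropWhile p l = c :: cs) : p c = false := by
  induction l with
  | nil => simp at h
  | cons a as ih =>
    rw [List.dropWhile_cons] at h
    split at h
    · exact ih h
    · rename_i hp; cases h; simpa using hp

theorem pv_dropWhile_of_head_false {p : Char → Bool} {l : List Char}
    (h : l = [] ∨ ∃ c cs, l = c :: cs ∧ p c = false) : List.dropWhile p l = l := by
  rcases h with h | ⟨c, cs, rfl, hc⟩
  · simp [h]
  · rw [List.dropWhile_cons, hc]; simp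

-- ---- strip facts on Chars ----
theorem pv_lstrip_eq_self_of_strip_eq {p : List Char} (h : PySem.Chars.strip p = p) :
    PySem.Chars.lstrip p = p := by
  have hsuf : PySem.Chars.lstrip p <:+ p := List.dropWhile_suffix _
  have h1 : (PySem.Chars.lstrip p).length ≤ p.length := List.length_dropWhile_le _ _
  have h2 : (PySem.Chars.strip p).length ≤ (PySem.Chars.lstrip p).length := by
    simp only [PySem.Chars.strip, PySem.Chars.rstrip]
    calc ((List.dropWhile PySem.Chars.isspace (PySem.Chars.lstrip p).reverse).reverse).length
        = (List.dropWhile PySem.Chars.isspace (PySem.Chars.lstrip p).reverse).length := by simp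
      _ ≤ (PySem.Chars.lstrip p).reverse.length := List.length_dropWhile_le _ _
      _ = (PySem.Chars.lstrip p).length := by simp
  have h3 := congrArg List.length h
  exact hsuf.eq_of_length (by omega)

theorem pv_rstrip_eq_self_of_strip_eq {p : List Char} (h : PySem.Chars.strip p = p) :
    PySem.Chars.rstrip p = p := by
  have hl := pv_lstrip_eq_self_of_strip_eq h
  have : PySem.Chars.strip p = PySem.Chars.rstrip p := by
    simp only [PySem.Chars.strip, hl]
  rw [← this, h]

theorem pv_rstrip_append {x y : List Char} (h : PySem.Chars.rstrip y = y) (hne : y ≠ []) :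
    PySem.Chars.rstrip (x ++ y) = x ++ y := by
  simp only [PySem.Chars.rstrip] at h ⊢
  rw [List.reverse_append, List.dropWhile_append]
  have hdw : List.dropWhile PySem.Chars.isspace y.reverse = y.reverse := by
    have := congrArg List.reverse h
    simpa using this
  rw [hdw]
  simp [hne]

theorem pv_strip_cons_space (x : List Char) :
    PySem.Chars.strip (' ' :: x) = PySem.Chars.strip x := by
  have : PySem.Chars.isspace ' ' = true := rfl
  simp [PySem.Chars.strip, PySem.Chars.lstrip, this]

theorem pv_strip_idem (s : List Char) :
    PySem.Chars.strip (PySem.Chars.strip s) = PySem.Chars.strip s := by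
  -- lstrip (rstrip (lstrip s)) = rstrip (lstrip s)
  have key : PySem.Chars.lstrip (PySem.Chars.rstrip (PySem.Chars.lstrip s)) = PySem.Chars.rstrip (PySem.Chars.lstrip s) := by
    cases ha : PySem.Chars.lstrip s with
    | nil => simp [PySem.Chars.rstrip, PySem.Chars.lstrip]
    | cons c cs =>
      have hc : PySem.Chars.isspace c = false := pv_dropWhile_head_false ha
      apply pv_dropWhile_of_head_false
      simp only [PySem.Chars.rstrip]
      rcases hr : List.dropWhile PySem.Chars.isspace (c :: cs).reverse with _ | ⟨d, ds⟩
      · left; simp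
      · right
        have hsuf : (d :: ds) <:+ (c :: cs).reverse := hr ▸ List.dropWhile_suffix _
        -- the reverse of a nonempty suffix of (c::cs).reverse is a prefix of c::cs
        have hpre : (d :: ds).reverse <+: (c :: cs) := by
          have := hsuf.reverse
          simpa using this
        rcases hpre with ⟨t, ht⟩
        rcases hrev : (d :: ds).reverse with _ | ⟨e, es⟩
        · simp at hrev
        · rw [hrev] at ht
          have he : e = c := by
            have := ht
            simp only [List.cons_append] at this
            exact (List.cons.injEq _ _ _ _ ▸ this).1
          exact ⟨e, es, rfl, by rw [he]; exact hc⟩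
  simp only [PySem.Chars.strip]
  rw [key]
  -- rstrip idempotent
  simp only [PySem.Chars.rstrip]
  rw [List.reverse_reverse, List.dropWhile_idempotent]

-- join of stripped nonempty pieces is already stripped
theorem pv_join_head (qs : List (List Char)) (p : List Char) :
    PySem.Chars.join [' '] (p :: qs) = p ++ qs.flatMap (fun q => ' ' :: q) := by
  induction qs generalizing p with
  | nil => simp [PySem.Chars.join_singleton]
  | cons q rest ih =>
    rw [PySem.Chars.join_cons_cons, ih q]
    simp

theorem pv_join_ne_nil {qs : List (List Char)} {p : List Char} (hp : p ≠ []) :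
    PySem.Chars.join [' '] (p :: qs) ≠ [] := by
  rw [pv_join_head]
  simp [hp]

theorem pv_lstrip_join (qs : List (List Char))
    (h : ∀ p ∈ qs, PySem.Chars.strip p = p ∧ p ≠ []) :
    PySem.Chars.lstrip (PySem.Chars.join [' '] qs) = PySem.Chars.join [' '] qs := by
  cases qs with
  | nil => rfl
  | cons p rest =>
    obtain ⟨hp, hpne⟩ := h p (by simp)
    rw [pv_join_head]
    simp only [PySem.Chars.lstrip, List.dropWhile_append]
    have hdp : List.dropWhile PySem.Chars.isspace p = p := pv_lstrip_eq_self_of_strip_eq hp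
    rw [hdp]
    simp [hpne]

theorem pv_rstrip_join (qs : List (List Char))
    (h : ∀ p ∈ qs, PySem.Chars.strip p = p ∧ p ≠ []) :
    PySem.Chars.rstrip (PySem.Chars.join [' '] qs) = PySem.Chars.join [' '] qs := by
  induction qs with
  | nil => rfl
  | cons p rest ih =>
    obtain ⟨hp, hpne⟩ := h p (by simp)
    cases rest with
    | nil =>
      rw [PySem.Chars.join_singleton]
      exact pv_rstrip_eq_self_of_strip_eq hp
    | cons q rest' =>
      obtain ⟨hq, hqne⟩ := h q (by simp)
      have hrest : ∀ x ∈ q :: rest', PySem.Chars.strip x = x ∧ x ≠ [] := by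
        intro x hx; exact h x (by simp [List.mem_cons] at hx ⊢; tauto)
      have hJ := ih hrest
      have hJne : PySem.Chars.join [' '] (q :: rest') ≠ [] := pv_join_ne_nil hqne
      rw [PySem.Chars.join_cons_cons]
      exact pv_rstrip_append hJ hJne

theorem pv_strip_join (qs : List (List Char))
    (h : ∀ p ∈ qs, PySem.Chars.strip p = p ∧ p ≠ []) :
    PySem.Chars.strip (PySem.Chars.join [' '] qs) = PySem.Chars.join [' '] qs := by
  have h1 := pv_lstrip_join qs h
  have h2 := pv_rstrip_join qs h
  simp only [PySem.Chars.strip]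
  rw [h1, h2]

-- ---- pvAcc vs pvPieces ----
theorem pv_acc_eq (ls : List String) :
    pvAcc ls = ((pvPieces ls).map String.toList).flatMap (fun p => ' ' :: p) := by
  induction ls with
  | nil => rfl
  | cons l rest ih =>
    by_cases h : PySem.Str.strip l = "" <;>
      simp [pvAcc, pvPieces, h, List.flatMap_cons] at ih ⊢ <;> simp [ih]

theorem pv_acc_append (xs ys : List String) : pvAcc (xs ++ ys) = pvAcc xs ++ pvAcc ys := by
  simp [pvAcc]

theorem pv_pieces_append (xs ys : List String) :
    pvPieces (xs ++ ys) = pvPieces xs ++ pvPieces ys := by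
  simp [pvPieces]

theorem pv_pieces_stripped {ls : List String} {p : String} (hp : p ∈ pvPieces ls) :
    PySem.Chars.strip p.toList = p.toList ∧ p.toList ≠ [] := by
  rw [pvPieces, List.mem_filterMap] at hp
  obtain ⟨l, -, hl⟩ := hp
  by_cases hne : PySem.Str.strip l = ""
  · rw [if_neg (show ¬(PySem.Str.strip l ≠ "") from fun h => h hne)] at hl
    cases hl
  · rw [if_pos hne] at hl
    injection hl with hl
    subst hl
    refine ⟨by rw [PySem.Str.toList_strip]; exact pv_strip_idem _, ?_⟩
    intro h0
    apply hne
    have h2 := congrArg String.ofList h0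
    rw [String.ofList_toList] at h2
    exact h2

theorem pv_strip_acc (ls : List String) :
    PySem.Chars.strip (pvAcc ls) =
      PySem.Chars.join [' '] ((pvPieces ls).map String.toList) := by
  rw [pv_acc_eq]
  cases hq : (pvPieces ls).map String.toList with
  | nil => rfl
  | cons p rest =>
    have hmem : ∀ x ∈ p :: rest, PySem.Chars.strip x = x ∧ x ≠ [] := by
      intro x hx
      rw [← hq] at hx
      simp only [List.mem_map] at hx
      obtain ⟨s, hs, rfl⟩ := hx
      exact pv_pieces_stripped hs
    rw [List.flatMap_cons]
    have : (' ' :: p) ++ rest.flatMap (fun q => ' ' :: q) = ' ' :: (p ++ rest.flatMap (fun q => ' ' :: q)) := by simp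
    rw [this, pv_strip_cons_space, ← pv_join_head]
    exact pv_strip_join _ hmem

-- ---- A's fold ----
theorem pv_foldA_some (ls : List String) (n : Int) (t : String) :
    ls.foldl pvStepA (some n, t) = (some n, String.ofList (t.toList ++ pvAcc ls)) := by
  induction ls generalizing t with
  | nil => simp [pvAcc]
  | cons l rest ih =>
    by_cases h : PySem.Str.strip l = ""
    · simp only [List.foldl_cons, pvStepA]
      rw [if_neg (by rintro ⟨_, hc, _⟩; cases hc)]
      rw [if_pos h]
      rw [ih]
      simp [pvAcc, h]
    · simp only [List.foldl_cons, pvStepA]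
      rw [if_neg (by rintro ⟨_, hc, _⟩; cases hc)]
      rw [if_neg h]
      rw [ih]
      simp [pvAcc, h]

theorem pv_foldA_none (ls : List String) (t : String)
    (h : ∀ x ∈ ls, pvQual x = false) :
    ls.foldl pvStepA (none, t) = (none, String.ofList (t.toList ++ pvAcc ls)) := by
  induction ls generalizing t with
  | nil => simp [pvAcc]
  | cons l rest ih =>
    have hq := h l (by simp)
    have hrest : ∀ x ∈ rest, pvQual x = false := fun x hx => h x (by simp [hx])
    by_cases hs : PySem.Str.strip l = ""
    · simp only [List.foldl_cons, pvStepA]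
      rw [if_neg (by rintro ⟨hc, _, _⟩; exact hc hs)]
      rw [if_pos hs]
      rw [ih _ hrest]
      simp [pvAcc, hs]
    · have hin : PySem.Str.isIn "question" (PySem.Str.lower l) = false := by
        unfold pvQual at hq
        cases hcheck : PySem.Str.isIn "question" (PySem.Str.lower l) with
        | false => rfl
        | true => rw [hcheck] at hq; simp [hs] at hq
      simp only [List.foldl_cons, pvStepA]
      rw [if_neg (by rintro ⟨_, _, hc⟩; rw [hin] at hc; cases hc)]
      rw [if_neg hs]
      rw [ih _ hrest]
      congr 1
      simp [pvAcc, hs]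

-- ---- pvScanQ characterization ----
theorem pv_scan_none (ls : List String) (i : Nat) (h : pvScanQ ls i = none) :
    ∀ x ∈ ls, pvQual x = false := by
  induction ls generalizing i with
  | nil => simp
  | cons l rest ih =>
    intro x hx
    simp only [pvScanQ] at h
    split at h
    · exact absurd h (by simp)
    · rename_i hcond
      rcases List.mem_cons.mp hx with hx | hx
      · subst hx
        unfold pvQual
        by_cases h1 : PySem.Str.strip x = ""
        · simp [h1]
        · cases h2 : PySem.Str.isIn "question" (PySem.Str.lower x) with
          | false => simp
          | true => exact absurd ⟨h1, h2⟩ hcond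
      · exact ih (i + 1) h x hx

theorem pv_scan_some (ls : List String) (i j : Nat) (q : String)
    (h : pvScanQ ls i = some (j, q)) :
    ∃ pre post, ls = pre ++ q :: post ∧ j = i + pre.length ∧
      (∀ x ∈ pre, pvQual x = false) ∧ pvQual q = true := by
  induction ls generalizing i with
  | nil => simp [pvScanQ] at h
  | cons l rest ih =>
    simp only [pvScanQ] at h
    split at h
    · rename_i hcond
      injection h with h
      injection h with h1 h2
      subst h1; subst h2
      exact ⟨[], rest, by simp, by simp, by simp, by unfold pvQual; rw [hcond.2]; simp [hcond.1]⟩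
    · rename_i hcond
      obtain ⟨pre, post, h1, h2, h3, h4⟩ := ih (i + 1) h
      refine ⟨l :: pre, post, by simp [h1], by simp; omega, ?_, h4⟩
      intro x hx
      rcases List.mem_cons.mp hx with hx | hx
      · subst hx
        unfold pvQual
        by_cases hs : PySem.Str.strip x = ""
        · simp [hs]
        · cases h2' : PySem.Str.isIn "question" (PySem.Str.lower x) with
          | false => simp
          | true => exact absurd ⟨hs, h2'⟩ hcond
      · exact h3 x hx

def pvNR (lines : List String) : Option Int × List String :=
  match pvScanQ lines 0 with
  | some (i, line) =>
      (some (pvParse line),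
       PySem.List.slice lines none (some (i : Int)) ++ PySem.List.slice lines (some ((i : Int) + 1)) none)
  | none => (none, lines)

theorem pv_main (lines : List String) :
    (((lines.foldl pvStepA ((none : Option Int), "")).1),
      PySem.Str.strip ((lines.foldl pvStepA ((none : Option Int), "")).2)) =
    ((pvNR lines).1, PySem.Str.join " " (pvPieces (pvNR lines).2)) := by
  cases hscan : pvScanQ lines 0 with
  | none =>
    have hnr : pvNR lines = (none, lines) := by simp only [pvNR, hscan]
    rw [hnr]
    have hall := pv_scan_none _ _ hscan
    rw [pv_foldA_none _ _ hall]
    simp only [PySem.Str.strip, PySem.Str.join]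
    congr 1
    have h1 : (String.ofList (("" : String).toList ++ pvAcc lines)).toList = pvAcc lines := by simp
    rw [h1, pv_strip_acc]
    rfl
  | some p =>
    obtain ⟨i, q⟩ := p
    obtain ⟨pre, post, hsplit, hj, hpre, hq⟩ := pv_scan_some _ _ _ _ hscan
    have hj0 : i = pre.length := by omega
    subst hj0
    have hslice1 : PySem.List.slice lines none (some (pre.length : Int)) = pre := by
      rw [PySem.List.slice_to_natCast, hsplit, List.take_left]
    have hslice2 : PySem.List.slice lines (some ((pre.length : Int) + 1)) none = post := by
      have h2 : ((pre.length : Int) + 1) = ((pre.length + 1 : Nat) : Int) := by push_cast; ring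
      rw [h2, PySem.List.slice_from_natCast, hsplit]
      have h3 : pre ++ q :: post = (pre ++ [q]) ++ post := by simp
      rw [h3]
      have hlen : pre.length + 1 = (pre ++ [q]).length := by simp
      rw [hlen, List.drop_left]
    have hnr : pvNR lines = (some (pvParse q), pre ++ post) := by
      simp only [pvNR, hscan]
      rw [hslice1, hslice2]
    rw [hnr]
    have hfold : lines.foldl pvStepA (none, "") =
        (some (pvParse q), String.ofList (pvAcc pre ++ pvAcc post)) := by
      rw [hsplit, List.foldl_append, pv_foldA_none _ _ hpre, List.foldl_cons]
      have hcond : PySem.Str.strip q ≠ "" ∧ PySem.Str.isIn "question" (PySem.Str.lower q) = true := by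
        unfold pvQual at hq
        constructor
        · intro hc; simp [hc] at hq
        · cases hc : PySem.Str.isIn "question" (PySem.Str.lower q) with
          | true => rfl
          | false => rw [hc] at hq; simp at hq
      have hstep : pvStepA (none, String.ofList (("" : String).toList ++ pvAcc pre)) q =
          (some (pvParse q), String.ofList (("" : String).toList ++ pvAcc pre)) := by
        simp only [pvStepA]
        rw [if_pos ⟨hcond.1, trivial, hcond.2⟩]
        rfl
      rw [hstep, pv_foldA_some]
      simp
    rw [hfold]
    simp only [PySem.Str.strip, PySem.Str.join]
    congr 1
    have h1 : (String.ofList (pvAcc pre ++ pvAcc post)).toList = pvAcc (pre ++ post) := by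
      simp [pv_acc_append]
    rw [h1, pv_strip_acc, pv_pieces_append]
    rfl

-- ===== VERDICT (by name: the statement is the Claim_ definition above) =====
theorem extract_question_number_text_spec : Claim_equal_extract_question_number_text := by
  intro value _ _
  unfold Spec_extract_question_number_text
  exact pv_main (PySem.Str.splitlines value)
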